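-- pv_equiv track=rewrite | github.com/eren23/attocode | src/attocode/integrations/path_security/__init__.py | contains_traversal
-- ===== SOURCE A (Python) =====
-- def contains_traversal(path: str) -> bool:
--     r"""Return True if *path* contains dangerous path traversal.
--
-- Blocks:
--     - Mid-path traversal: ``foo/../bar`` — escapes a directory mid-path
--     - Traversal that exits to system directories: ``../../etc/passwd``
--     - Trailing ``..`` or bare ``..``
--     - Encoded forms: ``%2e%2e``, ``%252e%252e``
--
-- Allows:
--     - Leading ``..`` chains that stay in user-space: ``../../pkg/module.py``,
--       ``../../../local/lib``
--
-- ``../../etc/passwd`` → True (blocked: system path)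
--     ``../../pkg/module.py`` → False (allowed: package-relative import)
--     ``../../../foo`` → False (allowed: user-space relative)
--     ``foo/../bar`` → True (blocked: mid-path traversal)
--     ``./../etc`` → True (blocked: escape after .)
--     ``..`` / ``../`` → True (blocked: bare/trailing traversal)
--     """
--     normalized = path.replace("\\", "/")
--     lower = normalized.lower()
--
--     # Encoded traversal
--     if "%2e%2e" in lower or "%252e%252e" in lower:
--         return True
--
--     # Bare ``..`` or trailing ``../`` (with or without final /)
--     # ``..`` alone: always dangerous.
--     # ``../`` (parent of working dir): also dangerous.
--     # BUT ``.../..`` is valid — ``...`` is a directory named three dots,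
--     # so ``.../..`` means the parent of that directory (the current directory).
--     if normalized == ".." or normalized == "../" or normalized.endswith("/.."):
--         if not (normalized.startswith(".../..") or
--                 normalized.lstrip("./").startswith(".../")):
--             return True
--
--     # System directory escape: ``../etc/passwd``, ``../../etc/shadow``
--     # Also block ``./../etc`` — escaping via the current directory marker.
--     # But ``../../pkg`` and ``../../../foo`` are user-space — allow.
--     # Handle both leading ../ and ./../ patterns
--
--     def _is_system_escape(path: str) -> bool:
--         """Check if path escapes to a system directory via leading ../."""
--         parts = path.split("/")
--         i = 0
--         while i < len(parts) and parts[i] == "..":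
--             i += 1
--         if i < len(parts):
--             return parts[i].lower() in {
--                 "etc", "usr", "var", "root", "home",
--                 "sys", "proc", "dev",
--             }
--         return False
--
--     if _is_system_escape(normalized.lstrip("./")):
--         return True
--
--     # Mid-path /../ (not in the leading chain) — find and block
--     idx = 0
--     while True:
--         idx = normalized.find("/../", idx)
--         if idx == -1:
--             break
--         # Block if the part before this /../ contains any real directory name
--         # (non-dot, non-slash chars). Allow if it's only . or .. or empty.
--         before = normalized[:idx]
--         if before.replace(".", "").replace("/", "") != "":
--             return True  # real directory name before /../ → mid-path traversal
--         idx += 1  # continue (skip leading ../ chain)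
--
--     return False
-- ===== SOURCE B (Python) =====
-- def contains_traversal(path: str) -> bool:
--     """Return True if *path* contains dangerous path traversal.
--
--     Same decision as the original, but the mid-path ``/../`` detection is a
--     single split-and-scan over the path components instead of a repeated
--     substring-find loop.
--     """
--     normalized = path.replace("\\", "/")
--     lower = normalized.lower()
--
--     # Encoded traversal
--     if "%2e%2e" in lower or "%252e%252e" in lower:
--         return True
--
--     # Bare ".." / "../" / trailing "/.." — except the "..." directory idioms
--     if normalized == ".." or normalized == "../" or normalized.endswith("/.."):
--         if not (normalized.startswith(".../..") or
--                 normalized.lstrip("./").startswith(".../")):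
--             return True
--
--     # System directory escape after the leading ../ chain
--     for part in normalized.lstrip("./").split("/"):
--         if part != "..":
--             if part.lower() in ("etc", "usr", "var", "root", "home",
--                                 "sys", "proc", "dev"):
--                 return True
--             break
--
--     # Mid-path traversal: a ".." component that is followed by a further
--     # component and preceded (anywhere) by a real (non-dot) component.
--     parts = normalized.split("/")
--     seen_real = False
--     for j, part in enumerate(parts):
--         if part == ".." and seen_real and j + 1 < len(parts):
--             return True
--         seen_real = seen_real or any(c != "." for c in part)
--     return False
-- ===== Notes on version B (the rewrite author's own statement) =====
-- stated objective: alternative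
-- what changed: The mid-path '/../' detection is a single split('/')-and-scan over the path components with a seen-real-component flag (and the system-escape helper becomes a for/break scan) instead of A's repeated substring find('/../', idx) loop that re-examines a growing prefix each round.
import Mathlib
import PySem

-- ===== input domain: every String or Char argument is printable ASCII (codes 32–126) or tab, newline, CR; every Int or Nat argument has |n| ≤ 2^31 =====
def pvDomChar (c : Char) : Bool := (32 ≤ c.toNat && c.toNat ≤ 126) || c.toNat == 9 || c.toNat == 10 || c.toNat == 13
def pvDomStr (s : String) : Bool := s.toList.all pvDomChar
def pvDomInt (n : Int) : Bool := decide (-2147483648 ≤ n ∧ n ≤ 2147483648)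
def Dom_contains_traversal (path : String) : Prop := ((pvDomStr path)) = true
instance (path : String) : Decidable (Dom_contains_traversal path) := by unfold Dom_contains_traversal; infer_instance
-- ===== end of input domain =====

-- B replaces A's repeated substring-find loop for mid-path "/../" (and the index-while in the
-- system-directory helper) by a single split('/')-and-scan over the path components
-- (objective: alternative decomposition, same behaviour).

-- ===== PORT A =====

-- the "/../" pattern A repeatedly searches for
def pvSlash4 : List Char := ['/', '.', '.', '/']

-- the system-directory names of A's set literal
def pvSysDirs : List (List Char) :=
  ["etc", "usr", "var", "root", "home", "sys", "proc", "dev"].map String.toList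

-- A's nested helper `_is_system_escape`: split on "/", skip the leading ".." run
-- (the index `while` loop), then test parts[i].lower() against the set.
def pvIsSystemEscapeA (p : List Char) : Bool :=
  match (PySem.Chars.splitOn p ['/']).dropWhile (fun q => q == ['.', '.']) with
  | [] => false
  | q :: _ => pvSysDirs.contains (PySem.Chars.lower q)

-- A's `while True:` / `find("/../", idx)` loop; the fuel (length+1, enough for the at most
-- length restarts) only makes the loop total, each iteration restarts the search at the
-- found index + 1 exactly as the Python does.
def pvMidLoopA (s : List Char) (fuel idx : Nat) : Bool :=
  match fuel with
  | 0 => false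
  | fuel + 1 =>
    if PySem.Chars.findFrom s pvSlash4 (idx : Int) = -1 then false
    else if PySem.Chars.replace (PySem.Chars.replace
        (s.take (PySem.Chars.findFrom s pvSlash4 (idx : Int)).toNat) ['.'] []) ['/'] [] ≠ [] then
      true
    else pvMidLoopA s fuel ((PySem.Chars.findFrom s pvSlash4 (idx : Int)).toNat + 1)

def contains_traversal (path : String) : Bool :=
  let normalized := PySem.Chars.replace path.toList ['\\'] ['/']
  let low := PySem.Chars.lower normalized
  if PySem.Chars.isIn "%2e%2e".toList low || PySem.Chars.isIn "%252e%252e".toList low then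
    true
  else if (normalized == "..".toList || normalized == "../".toList
        || PySem.Chars.endswith normalized "/..".toList)
      && !(PySem.Chars.startswith normalized ".../..".toList
        || PySem.Chars.startswith (normalized.dropWhile (fun c => c == '.' || c == '/'))
             ".../".toList) then
    true
  else if pvIsSystemEscapeA (normalized.dropWhile (fun c => c == '.' || c == '/')) then
    true
  else
    pvMidLoopA normalized (normalized.length + 1) 0

-- ===== PORT B =====

-- B's for/break loop over the stripped parts: the first part ≠ ".." decides.
def pvSysScanB (parts : List (List Char)) : Bool :=
  match parts with
  | [] => false
  | p :: rest =>
    if p != ['.', '.'] then pvSysDirs.contains (PySem.Chars.lower p)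
    else pvSysScanB rest

-- B's single scan over parts: a ".." part that is not last, after a real (non-dot) part.
def pvMidScanB (parts : List (List Char)) (seen : Bool) : Bool :=
  match parts with
  | [] => false
  | p :: rest =>
    if p == ['.', '.'] && seen && !rest.isEmpty then true
    else pvMidScanB rest (seen || p.any (fun c => c != '.'))

def contains_traversal_alt (path : String) : Bool :=
  let normalized := PySem.Chars.replace path.toList ['\\'] ['/']
  let low := PySem.Chars.lower normalized
  if PySem.Chars.isIn "%2e%2e".toList low || PySem.Chars.isIn "%252e%252e".toList low then
    true
  else if (normalized == "..".toList || normalized == "../".toList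
        || PySem.Chars.endswith normalized "/..".toList)
      && !(PySem.Chars.startswith normalized ".../..".toList
        || PySem.Chars.startswith (normalized.dropWhile (fun c => c == '.' || c == '/'))
             ".../".toList) then
    true
  else if pvSysScanB (PySem.Chars.splitOn
      (normalized.dropWhile (fun c => c == '.' || c == '/')) ['/']) then
    true
  else
    pvMidScanB (PySem.Chars.splitOn normalized ['/']) false

-- ===== PRECONDITION & SPEC =====
def Spec_contains_traversal (path : String) (out : Bool) : Prop := out = contains_traversal_alt path
instance (path : String) (out : Bool) : Decidable (Spec_contains_traversal path out) := by unfold Spec_contains_traversal; infer_instance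

-- ===== CLAIM (what is proved, stated in full; the proofs are below) =====
def Claim_equal_contains_traversal : Prop := ∀ (path : String), Dom_contains_traversal path → Spec_contains_traversal path (contains_traversal path)

-- ===== LEMMAS AND PROOFS =====

-- "a real character": neither '.' nor '/'
def pvReal : Char → Bool := fun c => !(c == '.') && !(c == '/')

-- structural version of split-on-'/'
def pvSplitSlash : List Char → List (List Char)
  | [] => [[]]
  | c :: t => if c = '/' then [] :: pvSplitSlash t else (pvSplitSlash t).modifyHead (c :: ·)

def pvJoin : List (List Char) → List Char
  | [] => []
  | [p] => p
  | p :: q :: ps => p ++ '/' :: pvJoin (q :: ps)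

-- char-level scan both programs' mid-path detections are reduced to
def pvScan : List Char → Bool → Bool
  | [], _ => false
  | c :: t, seen => (seen && pvSlash4.isPrefixOf (c :: t)) || pvScan t (seen || pvReal c)

lemma pv_replace_go (a : Char) :
    ∀ (fuel : Nat) (s acc : List Char), s.length ≤ fuel →
      PySem.Chars.replace.go [a] [] fuel s acc = acc.reverse ++ s.filter (fun c => !(c == a)) := by
  intro fuel
  induction fuel with
  | zero =>
    intro s acc h
    cases s with
    | nil => unfold PySem.Chars.replace.go; simp
    | cons c t => simp at h
  | succ n ih =>
    intro s acc h
    cases s with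
    | nil => unfold PySem.Chars.replace.go; simp
    | cons c t =>
      unfold PySem.Chars.replace.go
      by_cases hc : a = c
      · subst hc
        rw [if_pos (by simp [List.isPrefixOf])]
        rw [show List.drop [a].length (a :: t) = t by simp]
        rw [show ([] : List Char).reverse ++ acc = acc by simp]
        rw [ih t acc (by simpa using h)]
        simp
      · rw [if_neg (by simp [List.isPrefixOf]; exact fun hh => (hc hh).elim)]
        rw [ih t (c :: acc) (by simpa using h)]
        simp [Ne.symm hc]

lemma pv_replace_single (a : Char) (s : List Char) :
    PySem.Chars.replace s [a] [] = s.filter (fun c => !(c == a)) := by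
  unfold PySem.Chars.replace
  rw [if_neg (by simp)]
  simpa using pv_replace_go a s.length s [] le_rfl

lemma pv_before_test (s : List Char) :
    (PySem.Chars.replace (PySem.Chars.replace s ['.'] []) ['/'] [] ≠ []) ↔ s.any pvReal = true := by
  rw [pv_replace_single, pv_replace_single, List.filter_filter]
  rw [ne_eq, List.filter_eq_nil_iff]
  push_neg
  constructor
  · rintro ⟨c, hc, hp⟩
    refine List.any_eq_true.mpr ⟨c, hc, ?_⟩
    revert hp; simp [pvReal]; tauto
  · intro h
    obtain ⟨c, hc, hp⟩ := List.any_eq_true.mp h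
    refine ⟨c, hc, ?_⟩
    revert hp; simp [pvReal]; tauto

lemma pvSplitSlash_ne_nil (s : List Char) : pvSplitSlash s ≠ [] := by
  induction s with
  | nil => simp [pvSplitSlash]
  | cons c t ih =>
    simp only [pvSplitSlash]
    split
    · simp
    · cases h : pvSplitSlash t with
      | nil => exact absurd h ih
      | cons q qs => simp

lemma pv_splitOn_go :
    ∀ (fuel : Nat) (s cur : List Char) (acc : List (List Char)), s.length ≤ fuel →
      PySem.Chars.splitOn.go ['/'] fuel s cur acc
        = acc.reverse ++ (pvSplitSlash s).modifyHead (cur.reverse ++ ·) := by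
  intro fuel
  induction fuel with
  | zero =>
    intro s cur acc h
    cases s with
    | nil => unfold PySem.Chars.splitOn.go; simp [pvSplitSlash]
    | cons c t => simp at h
  | succ n ih =>
    intro s cur acc h
    cases s with
    | nil => unfold PySem.Chars.splitOn.go; simp [pvSplitSlash]
    | cons c t =>
      unfold PySem.Chars.splitOn.go
      by_cases hc : c = '/'
      · subst hc
        rw [if_pos (by simp [List.isPrefixOf])]
        rw [show List.drop ['/'].length ('/' :: t) = t by simp]
        rw [ih t [] (cur.reverse :: acc) (by simpa using h)]
        simp only [pvSplitSlash, List.reverse_nil, List.reverse_cons, List.nil_append,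
          List.modifyHead_cons, List.append_assoc, List.singleton_append]
        cases pvSplitSlash t <;> simp
      · rw [if_neg (by simp [List.isPrefixOf]; exact fun hh => (hc hh.symm).elim)]
        rw [ih t (c :: cur) acc (by simpa using h)]
        simp only [pvSplitSlash, if_neg hc]
        cases hsp : pvSplitSlash t with
        | nil => exact absurd hsp (pvSplitSlash_ne_nil t)
        | cons q qs => simp

lemma pv_splitOn_slash (s : List Char) :
    PySem.Chars.splitOn s ['/'] = pvSplitSlash s := by
  unfold PySem.Chars.splitOn
  rw [pv_splitOn_go (s.length + 1) s [] [] (by omega)]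
  cases h : pvSplitSlash s with
  | nil => exact absurd h (pvSplitSlash_ne_nil s)
  | cons q qs => simp

lemma pv_join_splitSlash (s : List Char) : pvJoin (pvSplitSlash s) = s := by
  induction s with
  | nil => simp [pvSplitSlash, pvJoin]
  | cons c t ih =>
    simp only [pvSplitSlash]
    by_cases hc : c = '/'
    · subst hc
      rw [if_pos rfl]
      cases h : pvSplitSlash t with
      | nil => exact absurd h (pvSplitSlash_ne_nil t)
      | cons q qs =>
        rw [show pvJoin ([] :: q :: qs) = [] ++ '/' :: pvJoin (q :: qs) from rfl]
        rw [show pvJoin (q :: qs) = t from h ▸ ih]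
        rfl
    · rw [if_neg hc]
      cases h : pvSplitSlash t with
      | nil => exact absurd h (pvSplitSlash_ne_nil t)
      | cons q qs =>
        have ih' : pvJoin (q :: qs) = t := h ▸ ih
        cases qs with
        | nil =>
          show pvJoin [c :: q] = c :: t
          simp only [pvJoin] at ih' ⊢
          rw [ih']
        | cons r rs =>
          show pvJoin ((c :: q) :: r :: rs) = c :: t
          rw [show pvJoin ((c :: q) :: r :: rs) = (c :: q) ++ '/' :: pvJoin (r :: rs) from rfl]
          rw [show pvJoin (q :: r :: rs) = q ++ '/' :: pvJoin (r :: rs) from rfl] at ih'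
          rw [List.cons_append, ih']

lemma pv_no_slash_splitSlash (s : List Char) :
    ∀ p ∈ pvSplitSlash s, '/' ∉ p := by
  induction s with
  | nil => intro p hp; simp [pvSplitSlash] at hp; simp [hp]
  | cons c t ih =>
    intro p hp
    simp only [pvSplitSlash] at hp
    by_cases hc : c = '/'
    · rw [if_pos hc] at hp
      rcases List.mem_cons.mp hp with h | h
      · simp [h]
      · exact ih p h
    · rw [if_neg hc] at hp
      cases h : pvSplitSlash t with
      | nil => exact absurd h (pvSplitSlash_ne_nil t)
      | cons q qs =>
        rw [h] at hp
        rcases List.mem_cons.mp hp with hh | hh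
        · subst hh
          intro hm
          rcases List.mem_cons.mp hm with h1 | h1
          · exact hc h1.symm
          · exact ih q (h ▸ List.mem_cons_self ..) h1
        · exact ih p (h ▸ List.mem_cons_of_mem q hh)

lemma pvScan_append (p : List Char) (hp : '/' ∉ p) :
    ∀ (u : List Char) (seen : Bool), pvScan (p ++ u) seen = pvScan u (seen || p.any pvReal) := by
  induction p with
  | nil => intro u seen; simp
  | cons c p' ih =>
    intro u seen
    have hc : c ≠ '/' := by intro h; exact hp (h ▸ List.mem_cons_self ..)
    have hp' : '/' ∉ p' := fun h => hp (List.mem_cons_of_mem c h)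
    simp only [List.cons_append, pvScan]
    rw [show pvSlash4.isPrefixOf (c :: (p' ++ u)) = false by
      simp [pvSlash4, List.isPrefixOf]; intro h; exact absurd h.symm hc]
    rw [ih hp' u (seen || pvReal c)]
    simp [Bool.or_assoc]

lemma pv_anyReal_of_no_slash (p : List Char) (hp : '/' ∉ p) :
    p.any pvReal = p.any (fun c => c != '.') := by
  induction p with
  | nil => rfl
  | cons c p' ih =>
    have hc : c ≠ '/' := by intro h; exact hp (h ▸ List.mem_cons_self ..)
    have hp' : '/' ∉ p' := fun h => hp (List.mem_cons_of_mem c h)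
    have hslash : (c == '/') = false := beq_eq_false_iff_ne.mpr hc
    simp [pvReal, hslash, ih hp', bne]

lemma pv_leadpart (p rest : List Char) (hp : '/' ∉ p) :
    List.isPrefixOf ['.', '.', '/'] (p ++ '/' :: rest) = (p == ['.', '.']) := by
  cases p with
  | nil => simp [List.isPrefixOf]
  | cons c1 t1 =>
    cases t1 with
    | nil => by_cases h1 : c1 = '.' <;> simp [List.isPrefixOf, h1]
    | cons c2 t2 =>
      cases t2 with
      | nil =>
        by_cases h1 : c1 = '.' <;> by_cases h2 : c2 = '.'
        · subst h1; subst h2; simp [List.isPrefixOf]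
        · subst h1; simp [List.isPrefixOf, h2, Ne.symm h2]
        · subst h2; simp [List.isPrefixOf, h1, Ne.symm h1]
        · have e1 : ('.' == c1) = false := beq_eq_false_iff_ne.mpr (Ne.symm h1)
          have e2 : (c1 == '.') = false := beq_eq_false_iff_ne.mpr h1
          simp [List.isPrefixOf, e1, e2]
      | cons c3 t3 =>
        have hc3 : c3 ≠ '/' := by intro h; apply hp; rw [← h]; simp
        by_cases h1 : c1 = '.' <;> by_cases h2 : c2 = '.'
        · subst h1; subst h2; simp [List.isPrefixOf, Ne.symm hc3]
        · subst h1; simp [List.isPrefixOf, h2, Ne.symm h2, Ne.symm hc3]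
        · subst h2; simp [List.isPrefixOf, h1, Ne.symm h1, Ne.symm hc3]
        · simp [List.isPrefixOf, h1, Ne.symm h1, h2, Ne.symm h2, Ne.symm hc3]

lemma pv_midScan_join :
    ∀ (parts : List (List Char)), parts ≠ [] → (∀ p ∈ parts, '/' ∉ p) → ∀ seen,
      pvMidScanB parts seen
        = ((seen && List.isPrefixOf ['.', '.', '/'] (pvJoin parts)) || pvScan (pvJoin parts) seen) := by
  intro parts
  induction parts with
  | nil => intro h; exact absurd rfl h
  | cons p ps ih =>
    intro _ hns seen
    have hp : '/' ∉ p := hns p (List.mem_cons_self ..)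
    cases ps with
    | nil =>
      simp only [pvMidScanB, pvJoin, List.isEmpty_nil]
      rw [show pvScan p seen = false by
        have h0 := pvScan_append p hp [] seen
        rw [List.append_nil] at h0
        simpa [pvScan] using h0]
      rw [show List.isPrefixOf ['.', '.', '/'] p = false by
        cases h : List.isPrefixOf ['.', '.', '/'] p
        · rfl
        · exact absurd ((List.isPrefixOf_iff_prefix.mp h).subset (by simp)) hp]
      simp
    | cons q qs =>
      rw [show pvMidScanB (p :: q :: qs) seen
            = (if (p == ['.', '.'] && seen && !(q :: qs).isEmpty) = true then true
               else pvMidScanB (q :: qs) (seen || p.any (fun c => c != '.'))) from rfl]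
      have hrest : ∀ r ∈ q :: qs, '/' ∉ r := fun r hr => hns r (List.mem_cons_of_mem p hr)
      rw [ih (by simp) hrest (seen || p.any (fun c => c != '.'))]
      rw [show pvJoin (p :: q :: qs) = p ++ '/' :: pvJoin (q :: qs) from rfl]
      rw [pv_leadpart p _ hp]
      rw [pvScan_append p hp, pv_anyReal_of_no_slash p hp]
      simp only [pvScan]
      rw [show pvSlash4.isPrefixOf ('/' :: pvJoin (q :: qs))
            = List.isPrefixOf ['.', '.', '/'] (pvJoin (q :: qs)) by
        simp [pvSlash4, List.isPrefixOf]]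
      rw [show pvReal '/' = false from rfl]
      cases h1 : (p == ['.', '.']) <;> cases seen <;> simp

lemma pvScan_iff :
    ∀ (s : List Char) (seen : Bool),
      (pvScan s seen = true
        ↔ ∃ j : Nat, pvSlash4 <+: s.drop j ∧ (seen = true ∨ (s.take j).any pvReal = true)) := by
  intro s
  induction s with
  | nil =>
    intro seen
    simp only [pvScan, Bool.false_eq_true, false_iff]
    rintro ⟨j, hj, -⟩
    simp [pvSlash4] at hj
  | cons c t ih =>
    intro seen
    simp only [pvScan, Bool.or_eq_true, Bool.and_eq_true, List.isPrefixOf_iff_prefix]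
    rw [ih]
    constructor
    · rintro (⟨hs, hpfx⟩ | ⟨j, hj, hor⟩)
      · exact ⟨0, by simpa using hpfx, Or.inl hs⟩
      · refine ⟨j + 1, by simpa using hj, ?_⟩
        rcases hor with h | h
        · rcases (by simpa using h : seen = true ∨ pvReal c = true) with h' | h'
          · exact Or.inl h'
          · exact Or.inr (by simp [h'])
        · exact Or.inr (by simp [h])
    · rintro ⟨j, hj, hor⟩
      cases j with
      | zero =>
        rcases hor with h | h
        · exact Or.inl ⟨h, by simpa using hj⟩
        · simp at h
      | succ j =>
        refine Or.inr ⟨j, by simpa using hj, ?_⟩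
        rcases hor with h | h
        · exact Or.inl (by simp [h])
        · simp only [List.take_succ_cons, List.any_cons, Bool.or_eq_true] at h
          rcases h with h | h
          · exact Or.inl (by simp [h])
          · exact Or.inr h

lemma pvMidLoopA_iff (s : List Char) :
    ∀ (fuel idx : Nat), idx ≤ s.length → s.length + 1 ≤ fuel + idx →
      (pvMidLoopA s fuel idx = true
        ↔ ∃ j : Nat, idx ≤ j ∧ pvSlash4 <+: s.drop j ∧ (s.take j).any pvReal = true) := by
  intro fuel
  induction fuel with
  | zero => intro idx h1 h2; omega
  | succ n ih =>
    intro idx h1 h2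
    simp only [pvMidLoopA]
    by_cases hi : PySem.Chars.findFrom s pvSlash4 (idx : Int) = -1
    · rw [if_pos hi]
      simp only [Bool.false_eq_true, false_iff]
      rintro ⟨j, hij, hpfx, -⟩
      have hni := (PySem.Chars.findFrom_natCast_eq_neg_one_iff s pvSlash4 idx h1).mp hi
      apply hni
      have hdd : s.drop j = (s.drop idx).drop (j - idx) := by
        rw [List.drop_drop]; congr 1; omega
      rw [hdd] at hpfx
      exact hpfx.isInfix.trans (List.drop_suffix _ _).isInfix
    · rw [if_neg hi]
      obtain ⟨hle, hpfx, hmin⟩ := PySem.Chars.findFrom_natCast_spec s pvSlash4 idx h1 hi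
      have hin : idx ≤ (PySem.Chars.findFrom s pvSlash4 (idx : Int)).toNat := by omega
      have hlen : (PySem.Chars.findFrom s pvSlash4 (idx : Int)).toNat + 4 ≤ s.length := by
        have hl := hpfx.length_le
        rw [show pvSlash4.length = 4 from rfl, List.length_drop] at hl
        omega
      by_cases hb : (s.take (PySem.Chars.findFrom s pvSlash4 (idx : Int)).toNat).any pvReal = true
      · rw [if_pos ((pv_before_test _).mpr hb)]
        simp only [true_iff]
        exact ⟨_, hin, hpfx, hb⟩
      · rw [if_neg (fun hcon => hb ((pv_before_test _).mp hcon))]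
        rw [ih ((PySem.Chars.findFrom s pvSlash4 (idx : Int)).toNat + 1) (by omega) (by omega)]
        constructor
        · rintro ⟨j, hj, hpfx2, ha⟩; exact ⟨j, by omega, hpfx2, ha⟩
        · rintro ⟨j, hj, hpfx2, ha⟩
          refine ⟨j, ?_, hpfx2, ha⟩
          rcases Nat.lt_or_ge j ((PySem.Chars.findFrom s pvSlash4 (idx : Int)).toNat + 1) with hlt | hge
          · rcases Nat.lt_or_ge j (PySem.Chars.findFrom s pvSlash4 (idx : Int)).toNat with hlt2 | hge2
            · exact absurd hpfx2 (hmin j hj hlt2)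
            · have hj2 : j = (PySem.Chars.findFrom s pvSlash4 (idx : Int)).toNat := by omega
              rw [hj2] at ha
              exact absurd ha hb
          · exact hge

lemma pvSys_eq (p : List Char) :
    pvIsSystemEscapeA p = pvSysScanB (PySem.Chars.splitOn p ['/']) := by
  unfold pvIsSystemEscapeA
  generalize PySem.Chars.splitOn p ['/'] = parts
  induction parts with
  | nil => rfl
  | cons q qs ih =>
    by_cases h : q = ['.', '.']
    · subst h
      rw [List.dropWhile_cons, if_pos (by simp)]
      simp only [pvSysScanB]
      rw [if_neg (by simp)]
      exact ih
    · rw [List.dropWhile_cons, if_neg (by simpa using h)]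
      simp only [pvSysScanB]
      rw [if_pos (by simpa using h)]

lemma pvMid_eq (s : List Char) :
    pvMidLoopA s (s.length + 1) 0 = pvMidScanB (PySem.Chars.splitOn s ['/']) false := by
  rw [pv_splitOn_slash]
  rw [pv_midScan_join (pvSplitSlash s) (pvSplitSlash_ne_nil s) (pv_no_slash_splitSlash s) false]
  rw [pv_join_splitSlash]
  simp only [Bool.false_and, Bool.false_or]
  rw [Bool.eq_iff_iff]
  rw [pvMidLoopA_iff s (s.length + 1) 0 (by omega) (by omega), pvScan_iff]
  constructor
  · rintro ⟨j, -, hpfx, ha⟩; exact ⟨j, hpfx, Or.inr ha⟩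
  · rintro ⟨j, hpfx, hor⟩
    rcases hor with h | h
    · simp at h
    · exact ⟨j, Nat.zero_le j, hpfx, h⟩

-- ===== VERDICT (by name: the statement is the Claim_ definition above) =====
theorem contains_traversal_spec : Claim_equal_contains_traversal := by
  intro path _
  unfold Spec_contains_traversal contains_traversal contains_traversal_alt
  simp only [pvSys_eq, pvMid_eq]
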